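-- pv_equiv track=rewrite | github.com/rozetyp/contextpacker | context_packer/git_utils.py | filter_valid_paths
-- ===== SOURCE A (Python) =====
-- from typing import Dict, List, Optional
--
-- def get_valid_paths_from_index(file_index: List[Dict]) -> set:
--     return {entry["path"] for entry in file_index}
--
-- def filter_valid_paths(selected_paths: List[str], file_index: List[Dict]) -> List[str]:
--     valid_paths = get_valid_paths_from_index(file_index)
--     path_lookup: Dict[str, str] = {}
--     for path in valid_paths:
--         path_lookup[path] = path
--         if path.startswith("packages/"):
--             short_path = path[len("packages/"):]
--             if short_path not in path_lookup: path_lookup[short_path] = path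
--
--     result, seen = [], set()
--     for selected in selected_paths:
--         cleaned = selected.strip().strip("/")
--         if cleaned in path_lookup:
--             actual = path_lookup[cleaned]
--             if actual not in seen: result.append(actual); seen.add(actual)
--             continue
--         if not cleaned.startswith("packages/"):
--             with_prefix = f"packages/{cleaned}"
--             if with_prefix in path_lookup:
--                 actual = path_lookup[with_prefix]
--                 if actual not in seen: result.append(actual); seen.add(actual)
--     return result
-- ===== SOURCE B (Python) =====
-- def filter_valid_paths(selected_paths, file_index):
--     valid = {entry["path"] for entry in file_index}
--
--     def resolve(c):
--         if c in valid:
--             return c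
--         p = "packages/" + c
--         if p in valid:
--             return p
--         if not c.startswith("packages/") and "packages/" + p in valid:
--             return "packages/" + p
--         return None
--
--     result, seen = [], set()
--     for selected in selected_paths:
--         actual = resolve(selected.strip().strip("/"))
--         if actual is not None and actual not in seen:
--             result.append(actual)
--             seen.add(actual)
--     return result
-- ===== Notes on version B (the rewrite author's own statement) =====
-- stated objective: simpler
-- what changed: B drops A's precomputed path_lookup dictionary and its building loop entirely and instead resolves each selected path on the fly with direct membership probes (the path itself, then with one and, for non-packages paths, two 'packages/' prefixes) into the valid-path set, keeping the same selected-order dedup.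
import Mathlib
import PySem

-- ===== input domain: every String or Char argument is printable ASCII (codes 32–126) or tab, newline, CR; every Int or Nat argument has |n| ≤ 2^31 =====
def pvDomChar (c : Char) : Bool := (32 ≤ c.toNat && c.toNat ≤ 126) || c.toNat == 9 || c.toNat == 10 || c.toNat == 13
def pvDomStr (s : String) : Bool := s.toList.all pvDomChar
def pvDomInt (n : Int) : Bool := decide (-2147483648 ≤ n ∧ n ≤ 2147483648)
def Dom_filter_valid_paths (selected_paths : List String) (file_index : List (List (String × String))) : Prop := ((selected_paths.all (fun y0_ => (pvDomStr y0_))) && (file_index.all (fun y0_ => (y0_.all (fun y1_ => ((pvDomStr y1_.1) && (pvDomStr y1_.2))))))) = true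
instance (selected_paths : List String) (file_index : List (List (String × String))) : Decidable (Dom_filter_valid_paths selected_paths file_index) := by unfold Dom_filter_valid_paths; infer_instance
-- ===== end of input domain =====

-- B drops A's precomputed path_lookup table and its building loop and instead resolves each
-- selected path on the fly with direct membership probes into the valid-path set (objective: simpler).

-- ===== PORT A =====
-- get_valid_paths_from_index: {entry["path"] for entry in file_index} (KeyError excluded by Pre_)
def fvpValidPaths (file_index : List (List (String × String))) : PySem.Set String :=
  PySem.Set.ofList (file_index.map (fun entry => ((PySem.Dict.mk entry).get? "path").getD ""))

-- the body of A's 'for path in valid_paths' lookup-building loop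
def fvpBuildStep (L : PySem.Dict String String) (path : String) : PySem.Dict String String :=
  let L1 := L.insert path path
  if PySem.Str.startswith path "packages/" then
    let short := PySem.Str.slice path (some 9) none   -- path[len("packages/"):], len("packages/") = 9
    if (L1.get? short).isNone then L1.insert short path else L1
  else L1

def fvpBuildLookup (vs : List String) : PySem.Dict String String :=
  vs.foldl fvpBuildStep PySem.Dict.empty

-- the body of A's 'for selected in selected_paths' loop (state = (result, seen))
def fvpStepA (lookup : PySem.Dict String String) (st : List String × PySem.Set String) (selected : String) : List String × PySem.Set String :=
  let cleaned := PySem.Str.stripChars (PySem.Str.strip selected) "/"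
  match lookup.get? cleaned with
  | some actual => if st.2.contains actual then st else (st.1 ++ [actual], st.2.add actual)
  | none =>
    if !(PySem.Str.startswith cleaned "packages/") then
      match lookup.get? ("packages/" ++ cleaned) with
      | some actual => if st.2.contains actual then st else (st.1 ++ [actual], st.2.add actual)
      | none => st
    else st

def filter_valid_paths (selected_paths : List String) (file_index : List (List (String × String))) : List String :=
  let lookup := fvpBuildLookup (fvpValidPaths file_index)
  (selected_paths.foldl (fvpStepA lookup) ([], PySem.Set.empty)).1

-- ===== PORT B =====
-- B's resolve(): direct probes, no lookup table
def fvpResolve? (valid : PySem.Set String) (c : String) : Option String :=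
  if valid.contains c then some c
  else if valid.contains ("packages/" ++ c) then some ("packages/" ++ c)
  else if (!PySem.Str.startswith c "packages/") && valid.contains ("packages/" ++ ("packages/" ++ c)) then
    some ("packages/" ++ ("packages/" ++ c))
  else none

def fvpStepB (valid : PySem.Set String) (st : List String × PySem.Set String) (selected : String) : List String × PySem.Set String :=
  match fvpResolve? valid (PySem.Str.stripChars (PySem.Str.strip selected) "/") with
  | some actual => if st.2.contains actual then st else (st.1 ++ [actual], st.2.add actual)
  | none => st

def filter_valid_paths_alt (selected_paths : List String) (file_index : List (List (String × String))) : List String :=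
  let valid := PySem.Set.ofList (file_index.map (fun entry => ((PySem.Dict.mk entry).get? "path").getD ""))
  (selected_paths.foldl (fvpStepB valid) ([], PySem.Set.empty)).1

-- ===== PRECONDITION & SPEC =====
-- Pre_ excludes only inputs where A raises KeyError: an index entry without a "path" key.
def Pre_filter_valid_paths (selected_paths : List String) (file_index : List (List (String × String))) : Prop :=
  ∀ entry ∈ file_index, ((PySem.Dict.mk entry).get? "path").isSome = true
instance (selected_paths : List String) (file_index : List (List (String × String))) : Decidable (Pre_filter_valid_paths selected_paths file_index) := by unfold Pre_filter_valid_paths; infer_instance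

def pvWitness_filter_valid_paths : List String × (List (List (String × String))) :=
  (["x", " packages/y/ ", "y"], [[("path", "x")], [("path", "packages/y")]])

def Spec_filter_valid_paths (selected_paths : List String) (file_index : List (List (String × String))) (out : List String) : Prop := out = filter_valid_paths_alt selected_paths file_index
instance (selected_paths : List String) (file_index : List (List (String × String))) (out : List String) : Decidable (Spec_filter_valid_paths selected_paths file_index out) := by unfold Spec_filter_valid_paths; infer_instance

-- ===== CLAIM (what is proved, stated in full; the proofs are below) =====
def Claim_equal_filter_valid_paths : Prop := ∀ (selected_paths : List String) (file_index : List (List (String × String))), Dom_filter_valid_paths selected_paths file_index → Pre_filter_valid_paths selected_paths file_index → Spec_filter_valid_paths selected_paths file_index (filter_valid_paths selected_paths file_index)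

-- ===== LEMMAS AND PROOFS =====

-- what A's finished path_lookup answers for a key, as a function of the valid-path list
def fvpSpecGet (vs : List String) (k : String) : Option String :=
  if k ∈ vs then some k
  else if ("packages/" ++ k) ∈ vs then some ("packages/" ++ k)
  else none

lemma fvp_pk_inj {a b : String} (h : "packages/" ++ a = "packages/" ++ b) : a = b := by
  have := congrArg String.toList h
  simp [String.toList_append] at this
  exact String.toList_inj.mp this

lemma fvp_startswith_pk (k : String) : PySem.Str.startswith ("packages/" ++ k) "packages/" = true := by
  simp [PySem.Str.startswith, PySem.Chars.startswith_iff, String.toList_append]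

lemma fvp_decomp {p : String} (h : PySem.Str.startswith p "packages/" = true) :
    "packages/" ++ PySem.Str.slice p (some 9) none = p := by
  have hpre : ("packages/".toList) <+: p.toList := by
    simpa [PySem.Str.startswith, PySem.Chars.startswith_iff] using h
  obtain ⟨t, ht⟩ := hpre
  apply String.toList_inj.mp
  rw [String.toList_append, PySem.Str.toList_slice, PySem.Chars.slice_eq_listSlice,
      PySem.List.slice_from _ (by norm_num : (0:Int) ≤ 9)]
  rw [← ht]
  simp

lemma fvp_pk_ne (s : String) : "packages/" ++ s ≠ s := by
  intro h
  have := congrArg (fun x => x.toList.length) h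
  simp [String.toList_append] at this
  omega

lemma fvp_buildStep_spec (S : List String) (L : PySem.Dict String String) (q : String)
    (hq : q ∉ S) (hL : ∀ k, L.get? k = fvpSpecGet S k) :
    ∀ k, (fvpBuildStep L q).get? k = fvpSpecGet (S ++ [q]) k := by
  intro k
  unfold fvpBuildStep fvpSpecGet
  by_cases hs : PySem.Str.startswith q "packages/" = true
  · -- q = "packages/" ++ s
    set s := PySem.Str.slice q (some 9) none with hsdef
    have hqs : "packages/" ++ s = q := fvp_decomp hs
    have hsne : s ≠ q := by rw [← hqs]; exact fun h => fvp_pk_ne s h.symm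
    simp only [hs, if_true]
    have hget1 : (L.insert q q).get? s = L.get? s := by
      rw [PySem.Dict.get?_insert]; simp [hsne]
    by_cases hnone : ((L.insert q q).get? s).isNone = true
    · -- short key inserted: s ∉ S and "packages/" ++ s = q ∉ S
      have hLs : L.get? s = none := by
        rw [hget1] at hnone; exact Option.isNone_iff_eq_none.mp hnone
      rw [hL s] at hLs
      unfold fvpSpecGet at hLs
      have hsS : s ∉ S := by by_contra h; simp [h] at hLs
      have hpsS : ("packages/" ++ s) ∉ S := by by_contra h; simp [hsS, h] at hLs
      simp only [hnone, if_true]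
      rw [PySem.Dict.get?_insert, PySem.Dict.get?_insert]
      by_cases hks : k = s
      · subst hks
        simp [hsne, hqs, hsS]
      · by_cases hkq : k = q
        · subst hkq; simp [hks]
        · simp only [if_neg hks, if_neg hkq, hL k]
          unfold fvpSpecGet
          have hpkq : ("packages/" ++ k) ≠ q := by
            intro h; rw [← hqs] at h; exact hks (fvp_pk_inj h)
          by_cases h1 : k ∈ S
          · simp [h1, List.mem_append, hkq]
          · by_cases h2 : ("packages/" ++ k) ∈ S
            · simp [h1, h2, List.mem_append, hkq]
            · simp [h1, h2, List.mem_append, hkq, hpkq]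
    · -- short key already present: s ∈ S (since q ∉ S)
      have hLs : L.get? s ≠ none := by
        rw [← hget1]; exact fun h => by simp [h] at hnone
      rw [hL s] at hLs
      unfold fvpSpecGet at hLs
      have hsS : s ∈ S := by
        by_contra h
        have := hqs ▸ hq
        simp [h, this] at hLs
      rw [if_neg (by simp [hnone])]
      rw [PySem.Dict.get?_insert]
      by_cases hkq : k = q
      · subst hkq; simp
      · simp only [if_neg hkq, hL k]
        unfold fvpSpecGet
        by_cases h1 : k ∈ S
        · simp [h1, List.mem_append, hkq]
        · have hpkq : ("packages/" ++ k) ≠ q := by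
            intro h; rw [← hqs] at h
            exact h1 (by rw [fvp_pk_inj h]; exact hsS)
          by_cases h2 : ("packages/" ++ k) ∈ S
          · simp [h1, h2, List.mem_append, hkq]
          · simp [h1, h2, List.mem_append, hkq, hpkq]
  · -- q does not start with "packages/"
    rw [if_neg (by simpa using hs)]
    rw [PySem.Dict.get?_insert]
    by_cases hkq : k = q
    · subst hkq; simp
    · simp only [if_neg hkq, hL k]
      unfold fvpSpecGet
      have hpkq : ("packages/" ++ k) ≠ q := by
        intro h; rw [← h] at hs; exact hs (fvp_startswith_pk k)
      by_cases h1 : k ∈ S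
      · simp [h1, List.mem_append, hkq]
      · by_cases h2 : ("packages/" ++ k) ∈ S
        · simp [h1, h2, List.mem_append, hkq]
        · simp [h1, h2, List.mem_append, hkq, hpkq]

lemma fvp_build_invariant : ∀ (vs S : List String) (L : PySem.Dict String String),
    vs.Nodup → (∀ x ∈ vs, x ∉ S) → (∀ k, L.get? k = fvpSpecGet S k) →
    ∀ k, (vs.foldl fvpBuildStep L).get? k = fvpSpecGet (S ++ vs) k := by
  intro vs
  induction vs with
  | nil => intro S L _ _ hL k; simpa using hL k
  | cons q vs ih =>
    intro S L hnd hdisj hL k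
    have h1 := fvp_buildStep_spec S L q (hdisj q (by simp)) hL
    have h2 := ih (S ++ [q]) (fvpBuildStep L q) (List.Nodup.of_cons hnd)
      (by
        intro x hx
        simp only [List.mem_append, List.mem_singleton]
        rintro (h | rfl)
        · exact hdisj x (by simp [hx]) h
        · exact (List.nodup_cons.mp hnd).1 hx)
      h1
    simpa [List.append_assoc] using h2 k

lemma fvp_lookup_spec (vs : List String) (hnd : vs.Nodup) (k : String) :
    (fvpBuildLookup vs).get? k = fvpSpecGet vs k := by
  have := fvp_build_invariant vs [] PySem.Dict.empty hnd (by simp)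
    (by intro k; simp [fvpSpecGet, PySem.Dict.get?_empty]) k
  simpa using this

lemma fvp_step_eq (vs : PySem.Set String) (hnd : List.Nodup vs)
    (st : List String × PySem.Set String) (sel : String) :
    fvpStepA (fvpBuildLookup vs) st sel = fvpStepB vs st sel := by
  unfold fvpStepA fvpStepB fvpResolve?
  simp only [fvp_lookup_spec vs hnd]
  set c := PySem.Str.stripChars (PySem.Str.strip sel) "/" with hc
  unfold fvpSpecGet
  by_cases h1 : c ∈ vs
  · simp [h1]
  · by_cases h2 : ("packages/" ++ c) ∈ vs
    · simp [h1, h2]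
    · cases hsb : PySem.Str.startswith c "packages/" with
      | true => simp [h1, h2]
      | false =>
        by_cases h3 : ("packages/" ++ ("packages/" ++ c)) ∈ vs
        · simp [h1, h2, h3]
        · simp [h1, h2, h3]

-- ===== VERDICT (by name: the statement is the Claim_ definition above) =====
theorem filter_valid_paths_spec : Claim_equal_filter_valid_paths := by
  intro selected_paths file_index _ _
  unfold Spec_filter_valid_paths filter_valid_paths filter_valid_paths_alt
  have hnd : List.Nodup (fvpValidPaths file_index) := PySem.Set.nodup_ofList _
  have hstep : fvpStepA (fvpBuildLookup (fvpValidPaths file_index)) = fvpStepB (fvpValidPaths file_index) := by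
    funext st sel; exact fvp_step_eq _ hnd st sel
  show (List.foldl (fvpStepA (fvpBuildLookup (fvpValidPaths file_index))) ([], PySem.Set.empty) selected_paths).1 = _
  rw [hstep]
  rfl
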